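-- pv_equiv track=rewrite | github.com/BenjV/autosub | autosub/Addic7ed.py | _checkIfParseable
-- ===== SOURCE A (Python) =====
-- def _checkIfParseable(parametersList):
--     # only 1 paramter list can contain more than 1 element
--     for index,parameter in enumerate(parametersList):
--         if len(parameter) > 1:
--             tempLists = parametersList[:]
--             tempLists.pop(index)
--             for tempList in tempLists:
--                 if len(tempList) > 1:
--                     return True
--     return False
-- ===== SOURCE B (Python) =====
-- def _checkIfParseable(parametersList):
--     # Single linear pass: count lists longer than 1; parseable iff fewer than... i.e. True iff at least 2.
--     return sum(1 for p in parametersList if len(p) > 1) >= 2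
-- ===== Notes on version B (the rewrite author's own statement) =====
-- stated objective: simpler
-- what changed: Replaced the nested copy-pop-and-rescan (for each long list, copy the list, pop it, rescan for another long list) by a single pass counting lists with len > 1 and comparing the count with 2.
import Mathlib
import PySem

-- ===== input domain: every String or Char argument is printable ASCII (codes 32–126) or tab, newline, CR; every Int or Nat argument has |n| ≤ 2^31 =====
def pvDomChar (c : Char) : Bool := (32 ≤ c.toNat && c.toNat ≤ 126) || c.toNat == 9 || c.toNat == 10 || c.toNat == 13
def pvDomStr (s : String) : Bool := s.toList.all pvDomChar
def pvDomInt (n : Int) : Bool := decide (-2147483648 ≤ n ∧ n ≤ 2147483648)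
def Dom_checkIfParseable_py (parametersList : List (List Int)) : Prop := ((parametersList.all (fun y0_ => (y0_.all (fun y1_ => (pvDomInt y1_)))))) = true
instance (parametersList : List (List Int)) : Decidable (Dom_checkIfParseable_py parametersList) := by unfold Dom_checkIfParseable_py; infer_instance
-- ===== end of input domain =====

-- B changes A's nested copy/pop/rescan into one counting pass ("simpler"); same return value everywhere.

-- ===== PORT A =====
-- outer loop of A over enumerate(parametersList); carries the full list l for the slice copy + pop
def checkIfParseableLoopA : List (Int × List Int) → List (List Int) → Bool
  | [], _ => false
  | (index, parameter) :: rest, l =>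
    if parameter.length > 1 then
      -- tempLists = parametersList[:]; tempLists.pop(index)  (index from enumerate, always in range, so pop? is some)
      match PySem.List.pop? l index with
      | some (_, tempLists) =>
        -- inner loop: return True at the first long tempList, else continue the outer loop
        if tempLists.any (fun tempList => tempList.length > 1) then true
        else checkIfParseableLoopA rest l
      | none => false  -- unreachable: Python's pop cannot raise here
    else checkIfParseableLoopA rest l

def checkIfParseable_py (parametersList : List (List Int)) : Bool :=
  checkIfParseableLoopA (PySem.List.enumerate parametersList) parametersList

-- ===== PORT B =====
def checkIfParseable_py_alt (parametersList : List (List Int)) : Bool :=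
  decide (2 ≤ (parametersList.map (fun p => if p.length > 1 then (1 : Int) else 0)).sum)

-- ===== PRECONDITION & SPEC =====
def Spec_checkIfParseable_py (parametersList : List (List Int)) (out : Bool) : Prop := out = checkIfParseable_py_alt parametersList
instance (parametersList : List (List Int)) (out : Bool) : Decidable (Spec_checkIfParseable_py parametersList out) := by unfold Spec_checkIfParseable_py; infer_instance

-- ===== CLAIM (what is proved, stated in full; the proofs are below) =====
def Claim_equal_checkIfParseable_py : Prop := ∀ (parametersList : List (List Int)), Dom_checkIfParseable_py parametersList → Spec_checkIfParseable_py parametersList (checkIfParseable_py parametersList)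

-- ===== LEMMAS AND PROOFS =====

-- removing one element that satisfies the predicate lowers the count by exactly one
lemma countP_eraseIdx_self {α : Type} (p : α → Bool) :
    ∀ (l : List α) (k : Nat) (h : k < l.length),
      l.countP p = (l.eraseIdx k).countP p + (if p l[k] then 1 else 0) := by
  intro l
  induction l with
  | nil => intro k h; simp at h
  | cons x xs ih =>
    intro k h
    cases k with
    | zero => simp [List.countP_cons]
    | succ k =>
      have hk : k < xs.length := by simpa using h
      have := ih k hk
      simp only [List.countP_cons, List.eraseIdx_cons_succ, List.getElem_cons_succ, this]
      split_ifs <;> omega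

-- B's 0/1-sum is the natural count
lemma alt_eq_countP (l : List (List Int)) :
    checkIfParseable_py_alt l = decide (2 ≤ l.countP (fun p => p.length > 1)) := by
  unfold checkIfParseable_py_alt
  have hf : (fun p : List Int => if p.length > 1 then (1 : Int) else 0)
      = fun p => if (fun q : List Int => decide (q.length > 1)) p = true then (1 : Int) else 0 := by
    funext p; simp
  rw [hf, PySem.List.sum_map_ite_one_zero]
  rw [decide_eq_decide]
  omega

-- the generalized outer-loop invariant
lemma loopA_eq (l : List (List Int)) :
    ∀ xs : List (Int × List Int),
      (∀ ip ∈ xs, ∃ (k : Nat) (h : k < l.length), ip = ((k : Int), l[k])) →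
      checkIfParseableLoopA xs l =
        (xs.any (fun ip => ip.2.length > 1) && decide (2 ≤ l.countP (fun p => p.length > 1))) := by
  intro xs
  induction xs with
  | nil => intro _; simp [checkIfParseableLoopA]
  | cons ip rest ih =>
    intro h
    obtain ⟨k, hk, hip⟩ := h ip (by simp)
    obtain ⟨i, p⟩ := ip
    obtain ⟨hi, hp⟩ := Prod.mk.injEq .. ▸ hip
    subst hi hp
    rw [checkIfParseableLoopA]
    by_cases hlen : l[k].length > 1
    · rw [if_pos hlen, PySem.List.pop?_natCast l k hk]
      have hc := countP_eraseIdx_self (fun p : List Int => decide (p.length > 1)) l k hk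
      rw [if_pos (by simpa using hlen)] at hc
      have hany : (l.eraseIdx k).any (fun t => t.length > 1)
          = decide (2 ≤ l.countP (fun p => p.length > 1)) := by
        by_cases h2 : 2 ≤ l.countP (fun p => decide (p.length > 1))
        · obtain ⟨x, hx, hpx⟩ := List.countP_pos_iff.mp
            (show 0 < (l.eraseIdx k).countP (fun p : List Int => decide (p.length > 1)) by omega)
          simp only [h2, decide_true, List.any_eq_true]
          exact ⟨x, hx, hpx⟩
        · have h0 : (l.eraseIdx k).countP (fun p : List Int => decide (p.length > 1)) = 0 := by
            omega
          simp only [h2, decide_false, List.any_eq_false]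
          intro x hx
          simpa using List.countP_eq_zero.mp h0 x hx
      simp only [hany]
      by_cases h2 : 2 ≤ l.countP (fun p => decide (p.length > 1))
      · simp [h2, hlen]
      · simp only [h2, decide_false, Bool.and_false]
        rw [ih (fun q hq => h q (by simp [hq]))]
        simp [h2]
    · rw [if_neg hlen]
      rw [ih (fun q hq => h q (by simp [hq]))]
      simp [hlen]

-- ===== VERDICT (by name: the statement is the Claim_ definition above) =====
theorem checkIfParseable_py_spec : Claim_equal_checkIfParseable_py := by
  intro l _
  unfold Spec_checkIfParseable_py
  rw [alt_eq_countP, checkIfParseable_py]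
  rw [loopA_eq l (PySem.List.enumerate l) (fun ip hip => by
    obtain ⟨k, hk, hip⟩ := (PySem.List.mem_enumerate_iff l 0 ip).1 hip
    exact ⟨k, hk, by simpa using hip⟩)]
  have hany : (PySem.List.enumerate l).any (fun ip => ip.2.length > 1)
      = l.any (fun p => p.length > 1) := by
    rw [show (fun ip : Int × List Int => decide (ip.2.length > 1))
        = ((fun p : List Int => decide (p.length > 1)) ∘ (fun x => x.2)) from rfl,
      ← List.any_map, PySem.List.map_snd_enumerate]
  rw [hany]
  by_cases h2 : 2 ≤ l.countP (fun p => decide (p.length > 1))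
  · obtain ⟨x, hx, hpx⟩ := List.countP_pos_iff.mp (show 0 < l.countP (fun p : List Int => decide (p.length > 1)) by omega)
    simp only [h2, decide_true, Bool.and_true, List.any_eq_true]
    exact ⟨x, hx, hpx⟩
  · simp [h2]
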